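-- pv_equiv track=rewrite | github.com/xrrac42/orion | backend/data_validator.py | _check_duplicate_contas
-- ===== SOURCE A (Python) =====
-- from typing import Dict, Any, List, Optional, NamedTuple
--
-- def _check_duplicate_contas(contas: List[Dict[str, Any]]) -> List[str]:
--     """Verifica contas duplicadas"""
--     seen = set()
--     duplicates = []
--
--     for conta in contas:
--         if not isinstance(conta, dict):
--             continue
--
--         # Criar chave única baseada no grupo e conta específica
--         key = (
--             conta.get("grupo_principal", "").strip().upper(),
--             conta.get("conta_especifica", "").strip().upper()
--         )
--
--         if key in seen and key[1]:  # Só reportar se conta_especifica não está vazia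
--             duplicates.append(f"{key[0]} - {key[1]}")
--         else:
--             seen.add(key)
--
--     return list(set(duplicates))  # Remover duplicatas da lista de duplicatas
-- ===== SOURCE B (Python) =====
-- from typing import Dict, Any, List
--
--
-- def _check_duplicate_contas(contas: List[Dict[str, Any]]) -> List[str]:
--     """Count-first re-implementation: tally each (grupo, conta) key, then report keys seen twice or more."""
--     counter = {}
--     for conta in contas:
--         if not isinstance(conta, dict):
--             continue
--         key = (
--             conta.get("grupo_principal", "").strip().upper(),
--             conta.get("conta_especifica", "").strip().upper(),
--         )
--         counter[key] = counter.get(key, 0) + 1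
--
--     result = set()
--     for key, cnt in counter.items():
--         if cnt >= 2 and key[1]:
--             result.add(f"{key[0]} - {key[1]}")
--     return list(result)
-- ===== Notes on version B (the rewrite author's own statement) =====
-- stated objective: alternative
-- what changed: A's single pass with a seen-set that appends a report at every repeat occurrence is replaced by a count-first decomposition: one pass tallies every (grupo, conta) key in a dict counter, a second pass over the counter reports each key tallied twice or more with a non-empty conta_especifica.
import Mathlib
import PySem

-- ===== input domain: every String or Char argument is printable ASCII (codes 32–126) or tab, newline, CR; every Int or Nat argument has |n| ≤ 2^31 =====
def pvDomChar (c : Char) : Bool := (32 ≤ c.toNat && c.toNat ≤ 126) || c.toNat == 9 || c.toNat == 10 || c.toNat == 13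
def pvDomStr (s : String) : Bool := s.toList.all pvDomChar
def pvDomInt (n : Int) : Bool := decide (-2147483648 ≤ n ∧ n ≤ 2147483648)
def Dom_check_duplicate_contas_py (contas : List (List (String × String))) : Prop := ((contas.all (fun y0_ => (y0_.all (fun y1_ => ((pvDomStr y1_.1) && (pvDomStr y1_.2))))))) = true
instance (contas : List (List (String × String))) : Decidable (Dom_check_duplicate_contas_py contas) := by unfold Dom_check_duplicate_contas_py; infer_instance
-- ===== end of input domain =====

-- B replaces A's single-pass seen-set-and-append loop by a count-first decomposition (tally every
-- key, then report the keys tallied twice or more); similar cost, objective: alternative.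
-- Python's list(set(…)) iteration order is hash-dependent and this function's output is compared
-- as a set, so both ports render that final step canonically as the sorted distinct elements.

-- shared helpers: the key both Pythons compute for a conta, and the f-string "k0 - k1"
def pvKey (conta : List (String × String)) : String × String :=
  (PySem.Str.upper (PySem.Str.strip (PySem.Dict.getD (PySem.Dict.mk conta) "grupo_principal" "")),
   PySem.Str.upper (PySem.Str.strip (PySem.Dict.getD (PySem.Dict.mk conta) "conta_especifica" "")))

-- exact for f"{k.1} - {k.2}"
def pvFmt (k : String × String) : String := PySem.Str.join " - " [k.1, k.2]

-- rendering of 'list(<a set>)' (hash order not modelled; outputs compared as sets): sorted distinct elements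
def pvListOfSet (s : PySem.Set String) : List String := PySem.List.sorted s (fun x => x) false

-- ===== PORT A =====
-- the 'isinstance(conta, dict)' guard is always true on the typed domain (every element is a dict)
def pvLoopA : List (List (String × String)) → PySem.Set (String × String) → List String → List String
  | [], _, dups => dups
  | conta :: rest, seen, dups =>
    let key := pvKey conta
    if PySem.Set.contains seen key && !(key.2 == "") then
      pvLoopA rest seen (dups ++ [pvFmt key])
    else
      pvLoopA rest (PySem.Set.add seen key) dups

def check_duplicate_contas_py (contas : List (List (String × String))) : List String :=
  pvListOfSet (PySem.Set.ofList (pvLoopA contas PySem.Set.empty []))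

-- ===== PORT B =====
def check_duplicate_contas_py_alt (contas : List (List (String × String))) : List String :=
  let counter := contas.foldl (fun d conta =>
      PySem.Dict.insert d (pvKey conta) (PySem.Dict.getD d (pvKey conta) (0 : Int) + 1))
    PySem.Dict.empty
  let result := (PySem.Dict.items counter).foldl (fun s kv =>
      if decide ((2 : Int) ≤ kv.2) && !(kv.1.2 == "") then PySem.Set.add s (pvFmt kv.1) else s)
    PySem.Set.empty
  pvListOfSet result

-- ===== PRECONDITION & SPEC =====
def Spec_check_duplicate_contas_py (contas : List (List (String × String))) (out : List String) : Prop := out = check_duplicate_contas_py_alt contas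
instance (contas : List (List (String × String))) (out : List String) : Decidable (Spec_check_duplicate_contas_py contas out) := by unfold Spec_check_duplicate_contas_py; infer_instance

-- ===== CLAIM (what is proved, stated in full; the proofs are below) =====
def Claim_equal_check_duplicate_contas_py : Prop := ∀ (contas : List (List (String × String))), Dom_check_duplicate_contas_py contas → Spec_check_duplicate_contas_py contas (check_duplicate_contas_py contas)

-- ===== LEMMAS AND PROOFS =====

-- proof-only view of A's loop, recursing on the precomputed key list
def pvLoopK : List (String × String) → PySem.Set (String × String) → List String → List String
  | [], _, dups => dups
  | k0 :: ks, seen, dups =>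
    if PySem.Set.contains seen k0 && !(k0.2 == "") then
      pvLoopK ks seen (dups ++ [pvFmt k0])
    else
      pvLoopK ks (PySem.Set.add seen k0) dups

theorem pvLoopA_eq_pvLoopK (l : List (List (String × String)))
    (seen : PySem.Set (String × String)) (dups : List String) :
    pvLoopA l seen dups = pvLoopK (l.map pvKey) seen dups := by
  induction l generalizing seen dups with
  | nil => rfl
  | cons conta rest ih =>
    rw [List.map_cons, pvLoopA, pvLoopK]
    by_cases hc : (PySem.Set.contains seen (pvKey conta) && !((pvKey conta).2 == "")) = true
    · rw [if_pos hc, if_pos hc, ih]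
    · rw [if_neg hc, if_neg hc, ih]

-- membership in A's loop result: x is appended exactly at the repeat occurrences of a key with a
-- non-empty conta_especifica, so x appears iff some key of ks occurs at least twice in
-- pre ++ ks (pre = the already-processed keys; the loop's seen set is Set.ofList pre)
theorem pvLoopK_mem (ks : List (String × String)) (pre : List (String × String))
    (dups : List String) (x : String) :
    x ∈ pvLoopK ks (PySem.Set.ofList pre) dups ↔
      x ∈ dups ∨ ∃ k ∈ ks, 2 ≤ (pre ++ ks).count k ∧ k.2 ≠ "" ∧ x = pvFmt k := by
  induction ks generalizing pre dups with
  | nil => simp [pvLoopK]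
  | cons k0 ks ih =>
    have hcont : ((PySem.Set.ofList pre).contains k0 && !(k0.2 == "")) = true ↔
        (k0 ∈ pre ∧ k0.2 ≠ "") := by
      simp [PySem.Set.contains, PySem.Set.mem_ofList]
    rw [pvLoopK]
    by_cases hc : k0 ∈ pre ∧ k0.2 ≠ ""
    · rw [if_pos (hcont.2 hc), ih pre (dups ++ [pvFmt k0])]
      obtain ⟨hm, hne⟩ := hc
      constructor
      · rintro (hx | ⟨k, hk, hcnt, hkne, hfmt⟩)
        · rcases List.mem_append.1 hx with hx | hx
          · exact Or.inl hx
          · refine Or.inr ⟨k0, List.mem_cons_self, ?_, hne, by simpa using hx⟩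
            have h1 : 0 < pre.count k0 := List.count_pos_iff.2 hm
            simp only [List.count_append, List.count_cons_self]
            omega
        · refine Or.inr ⟨k, List.mem_cons_of_mem _ hk, ?_, hkne, hfmt⟩
          by_cases hkk : k = k0
          · subst hkk
            simp only [List.count_append, List.count_cons_self] at hcnt ⊢
            omega
          · have hkk' : ¬ k0 = k := fun h => hkk h.symm
            simp [List.count_append, hkk'] at hcnt ⊢
            omega
      · rintro (hx | ⟨k, hk, hcnt, hkne, hfmt⟩)
        · exact Or.inl (List.mem_append_left _ hx)
        · by_cases hkk : k = k0
          · subst hkk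
            exact Or.inl (List.mem_append_right _ (by simpa using hfmt.symm ▸ rfl))
          · rcases List.mem_cons.1 hk with h | h
            · exact absurd h hkk
            · refine Or.inr ⟨k, h, ?_, hkne, hfmt⟩
              have hkk' : ¬ k0 = k := fun h => hkk h.symm
              simp [List.count_append, hkk'] at hcnt ⊢
              omega
    · have hcond : ¬ (((PySem.Set.ofList pre).contains k0 && !(k0.2 == "")) = true) :=
        fun h => hc (hcont.1 h)
      rw [if_neg hcond, ← PySem.Set.ofList_append_singleton, ih (pre ++ [k0]) dups]
      constructor
      · rintro (hx | ⟨k, hk, hcnt, hkne, hfmt⟩)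
        · exact Or.inl hx
        · refine Or.inr ⟨k, List.mem_cons_of_mem _ hk, ?_, hkne, hfmt⟩
          by_cases hkk : k = k0
          · subst hkk
            simp [List.count_append] at hcnt ⊢
            omega
          · have hkk' : ¬ k0 = k := fun h => hkk h.symm
            simp [List.count_append, hkk'] at hcnt ⊢
            omega
      · rintro (hx | ⟨k, hk, hcnt, hkne, hfmt⟩)
        · exact Or.inl hx
        · by_cases hkk : k = k0
          · subst hkk
            have hnm : k ∉ pre := fun h => hc ⟨h, hkne⟩
            have h0 : pre.count k = 0 := List.count_eq_zero.2 hnm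
            have hcr : 0 < ks.count k := by
              simp [List.count_append] at hcnt
              omega
            refine Or.inr ⟨k, List.count_pos_iff.1 hcr, ?_, hkne, hfmt⟩
            simp [List.count_append] at hcnt ⊢
            omega
          · rcases List.mem_cons.1 hk with h | h
            · exact absurd h hkk
            · refine Or.inr ⟨k, h, ?_, hkne, hfmt⟩
              have hkk' : ¬ k0 = k := fun h => hkk h.symm
              simp [List.count_append, hkk'] at hcnt ⊢
              omega

-- membership in B's result-set loop
theorem pvFoldAdd_mem {β : Type} (p : β → Bool) (f : β → String) (l : List β)
    (s : PySem.Set String) (x : String) :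
    x ∈ l.foldl (fun s b => if p b then PySem.Set.add s (f b) else s) s ↔
      x ∈ s ∨ ∃ b ∈ l, p b = true ∧ x = f b := by
  induction l generalizing s with
  | nil => simp
  | cons b rest ih =>
    simp only [List.foldl_cons]
    by_cases hp : p b = true
    · rw [if_pos hp, ih, PySem.Set.mem_add]
      constructor
      · rintro (⟨h | h⟩ | ⟨c, hc, hpc, hx⟩)
        · exact Or.inl h
        · exact Or.inr ⟨b, List.mem_cons_self, hp, h⟩
        · exact Or.inr ⟨c, List.mem_cons_of_mem _ hc, hpc, hx⟩
      · rintro (h | ⟨c, hc, hpc, hx⟩)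
        · exact Or.inl (Or.inl h)
        · rcases List.mem_cons.1 hc with rfl | hc
          · exact Or.inl (Or.inr hx)
          · exact Or.inr ⟨c, hc, hpc, hx⟩
    · rw [if_neg hp, ih]
      constructor
      · rintro (h | ⟨c, hc, hpc, hx⟩)
        · exact Or.inl h
        · exact Or.inr ⟨c, List.mem_cons_of_mem _ hc, hpc, hx⟩
      · rintro (h | ⟨c, hc, hpc, hx⟩)
        · exact Or.inl h
        · rcases List.mem_cons.1 hc with rfl | hc
          · exact absurd hpc hp
          · exact Or.inr ⟨c, hc, hpc, hx⟩

-- B's result-set loop keeps the list duplicate-free (it only ever Set.adds)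
theorem pvFoldAdd_nodup {β : Type} (p : β → Bool) (f : β → String) (l : List β)
    (s : PySem.Set String) (hs : s.Nodup) :
    (l.foldl (fun s b => if p b then PySem.Set.add s (f b) else s) s).Nodup := by
  induction l generalizing s with
  | nil => exact hs
  | cons b rest ih =>
    simp only [List.foldl_cons]
    apply ih
    by_cases hp : p b = true
    · rw [if_pos hp, PySem.Set.add_eq_ite]
      by_cases hm : f b ∈ s
      · simpa [hm]
      · rw [if_neg hm]
        refine List.Nodup.append hs (List.nodup_singleton _) ?_
        intro a ha hb
        simp only [List.mem_singleton] at hb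
        exact hm (hb ▸ ha)
    · rwa [if_neg hp]

-- ===== VERDICT (by name: the statement is the Claim_ definition above) =====
theorem check_duplicate_contas_py_spec : Claim_equal_check_duplicate_contas_py := by
  intro contas _
  unfold Spec_check_duplicate_contas_py check_duplicate_contas_py check_duplicate_contas_py_alt
  have hcounter : contas.foldl (fun d conta =>
      PySem.Dict.insert d (pvKey conta) (PySem.Dict.getD d (pvKey conta) (0 : Int) + 1))
      PySem.Dict.empty = PySem.Dict.counter (contas.map pvKey) := by
    rw [← List.foldl_map (f := pvKey)
      (g := fun d k => PySem.Dict.insert d k (PySem.Dict.getD d k (0 : Int) + 1))]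
    exact PySem.Dict.foldl_insert_getD_add_one_eq_counter (contas.map pvKey)
  show pvListOfSet (PySem.Set.ofList (pvLoopA contas PySem.Set.empty [])) =
    pvListOfSet ((contas.foldl (fun d conta =>
        PySem.Dict.insert d (pvKey conta) (PySem.Dict.getD d (pvKey conta) (0 : Int) + 1))
        PySem.Dict.empty).items.foldl
      (fun s kv => if decide ((2 : Int) ≤ kv.2) && !(kv.1.2 == "") then PySem.Set.add s (pvFmt kv.1) else s)
      PySem.Set.empty)
  simp only [hcounter]
  unfold pvListOfSet
  rw [PySem.List.sorted_id_eq_sorted_id_iff_perm]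
  refine (List.perm_ext_iff_of_nodup (PySem.Set.nodup_ofList _)
    (pvFoldAdd_nodup _ _ _ _ (by simp [PySem.Set.empty]))).2 ?_
  intro x
  rw [PySem.Set.mem_ofList]
  have hA := pvLoopK_mem (contas.map pvKey) [] [] x
  simp only [List.nil_append, List.not_mem_nil, false_or] at hA
  rw [pvLoopA_eq_pvLoopK]
  rw [show (PySem.Set.empty : PySem.Set (String × String)) = PySem.Set.ofList [] from rfl, hA]
  rw [pvFoldAdd_mem]
  simp only [PySem.Set.empty, List.not_mem_nil, false_or]
  rw [PySem.Dict.items_counter]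
  constructor
  · rintro ⟨k, hk, hcnt, hkne, hx⟩
    refine ⟨(k, ((contas.map pvKey).count k : Int)), ?_, ?_, hx⟩
    · exact List.mem_map.2 ⟨k, (PySem.Set.mem_ofList _ _).2 hk, rfl⟩
    · simp only [Bool.and_eq_true, decide_eq_true_eq, Bool.not_eq_eq_eq_not, Bool.not_true,
        beq_eq_false_iff_ne, ne_eq]
      exact ⟨by exact_mod_cast hcnt, hkne⟩
  · rintro ⟨kv, hkv, hcond, hx⟩
    rcases List.mem_map.1 hkv with ⟨k, hk, rfl⟩
    simp only [Bool.and_eq_true, decide_eq_true_eq, Bool.not_eq_eq_eq_not, Bool.not_true,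
      beq_eq_false_iff_ne, ne_eq] at hcond
    exact ⟨k, (PySem.Set.mem_ofList _ _).1 hk, by exact_mod_cast hcond.1, hcond.2, hx⟩
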